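-- pv_equiv track=rewrite | github.com/sgchoi0605/stock_project_FMP | stock_backend/main.py | _build_missing_fiscal_quarters
-- ===== SOURCE A (Python) =====
-- def _period_to_quarter(period_value):
--     text = str(period_value or "").strip().upper()
--     if text in {"Q1", "Q2", "Q3", "Q4"}:
--         return int(text[1])
--     return None
--
-- def _build_missing_fiscal_quarters(calendar_year_value, period_value, count: int):
--     try:
--         year = int(str(calendar_year_value))
--     except ValueError:
--         return []
--     quarter = _period_to_quarter(period_value)
--     if quarter is None:
--         return []
--
--     out = []
--     for _ in range(count):
--         if quarter == 1:
--             year -= 1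
--             quarter = 4
--         else:
--             quarter -= 1
--         out.append((year, quarter))
--     return out
-- ===== SOURCE B (Python) =====
-- def _period_to_quarter(period_value):
--     text = str(period_value or "").strip().upper()
--     if text in {"Q1", "Q2", "Q3", "Q4"}:
--         return int(text[1])
--     return None
--
-- def _build_missing_fiscal_quarters(calendar_year_value, period_value, count: int):
--     try:
--         year = int(str(calendar_year_value))
--     except ValueError:
--         return []
--     quarter = _period_to_quarter(period_value)
--     if quarter is None:
--         return []
--     base = year * 4 + (quarter - 1)
--     return [((base - i) // 4, (base - i) % 4 + 1) for i in range(1, count + 1)]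
-- ===== Notes on version B (the rewrite author's own statement) =====
-- stated objective: alternative
-- what changed: Replaces the stateful decrement-and-carry loop over (year, quarter) with a closed-form comprehension over a single linear quarter index base = year*4 + quarter - 1, mapping each offset i to (idx//4, idx%4+1).
import Mathlib
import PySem

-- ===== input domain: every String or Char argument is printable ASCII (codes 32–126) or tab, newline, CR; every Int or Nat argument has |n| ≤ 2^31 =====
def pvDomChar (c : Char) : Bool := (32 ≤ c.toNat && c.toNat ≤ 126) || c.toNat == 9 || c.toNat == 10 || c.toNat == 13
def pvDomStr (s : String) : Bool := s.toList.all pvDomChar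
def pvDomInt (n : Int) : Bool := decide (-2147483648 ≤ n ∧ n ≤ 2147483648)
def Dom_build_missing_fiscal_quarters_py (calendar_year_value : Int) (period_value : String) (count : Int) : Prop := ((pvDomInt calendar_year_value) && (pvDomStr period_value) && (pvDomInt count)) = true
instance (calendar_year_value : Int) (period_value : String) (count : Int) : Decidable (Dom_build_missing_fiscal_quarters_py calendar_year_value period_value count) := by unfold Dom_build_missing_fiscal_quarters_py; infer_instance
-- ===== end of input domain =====

-- B replaces A's stateful decrement-and-carry loop over (year, quarter) by a closed-form map over a
-- linear quarter index (alternative decomposition, same O(count) cost); parse guards are kept identical.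
-- ===== PORT A =====
-- B reuses A's parse guards, so this helper is shared by both ports (Source B contains the same helper verbatim).
def pvPeriodToQuarter (period_value : String) : Option Int :=
  let text := PySem.Str.upper (PySem.Str.strip (if period_value = "" then "" else period_value))
  if text = "Q1" ∨ text = "Q2" ∨ text = "Q3" ∨ text = "Q4" then
    match PySem.Str.pyGet? text 1 with
    | some c => PySem.Int.ofStr? (String.ofList [c])
    | none => none            -- IndexError: unreachable under the guard
  else none

-- the loop body of A ('if quarter == 1: year -= 1; quarter = 4 else: quarter -= 1; out.append(...)'),
-- on state (year, quarter, out); the loop variable is unused, as in the Python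
def pvStep (s : Int × Int × List (Int × Int)) (_ : Int) : Int × Int × List (Int × Int) :=
  if s.2.1 = 1 then (s.1 - 1, 4, s.2.2 ++ [(s.1 - 1, 4)])
  else (s.1, s.2.1 - 1, s.2.2 ++ [(s.1, s.2.1 - 1)])

def build_missing_fiscal_quarters_py (calendar_year_value : Int) (period_value : String) (count : Int) : List (Int × Int) :=
  match PySem.Int.ofStr? (PySem.Int.toStr calendar_year_value) with
  | none => []
  | some year0 =>
    match pvPeriodToQuarter period_value with
    | none => []
    | some quarter0 =>
      let st := (PySem.List.pyRange 0 count 1).foldl pvStep (year0, quarter0, [])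
      st.2.2

-- ===== PORT B =====
def build_missing_fiscal_quarters_py_alt (calendar_year_value : Int) (period_value : String) (count : Int) : List (Int × Int) :=
  match PySem.Int.ofStr? (PySem.Int.toStr calendar_year_value) with
  | none => []
  | some year =>
    match pvPeriodToQuarter period_value with
    | none => []
    | some quarter =>
      let base := year * 4 + (quarter - 1)
      (PySem.List.pyRange 1 (count + 1) 1).map
        (fun i => (PySem.Int.floordiv (base - i) 4, PySem.Int.mod (base - i) 4 + 1))

-- ===== PRECONDITION & SPEC =====
def Spec_build_missing_fiscal_quarters_py (calendar_year_value : Int) (period_value : String) (count : Int) (out : List (Int × Int)) : Prop := out = build_missing_fiscal_quarters_py_alt calendar_year_value period_value count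
instance (calendar_year_value : Int) (period_value : String) (count : Int) (out : List (Int × Int)) : Decidable (Spec_build_missing_fiscal_quarters_py calendar_year_value period_value count out) := by unfold Spec_build_missing_fiscal_quarters_py; infer_instance

-- ===== CLAIM (what is proved, stated in full; the proofs are below) =====
def Claim_equal_build_missing_fiscal_quarters_py : Prop := ∀ (calendar_year_value : Int) (period_value : String) (count : Int), Dom_build_missing_fiscal_quarters_py calendar_year_value period_value count → Spec_build_missing_fiscal_quarters_py calendar_year_value period_value count (build_missing_fiscal_quarters_py calendar_year_value period_value count)

-- ===== LEMMAS AND PROOFS =====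


-- ===== LEMMAS AND PROOFS =====

-- whenever the period helper returns a quarter, it is between 1 and 4
lemma pvPeriodToQuarter_bounds (p : String) (q : Int)
    (h : pvPeriodToQuarter p = some q) : 1 ≤ q ∧ q ≤ 4 := by
  unfold pvPeriodToQuarter at h
  set text := PySem.Str.upper (PySem.Str.strip (if p = "" then "" else p)) with htext
  by_cases hg : text = "Q1" ∨ text = "Q2" ∨ text = "Q3" ∨ text = "Q4"
  · rw [if_pos hg] at h
    rcases hg with h1 | h1 | h1 | h1 <;> rw [h1] at h <;>
      simp only [PySem.Str.pyGet?] at h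
    · simp only [show PySem.Chars.pyGet? "Q1".toList 1 = some '1' from by decide,
        show PySem.Int.ofStr? (String.ofList ['1']) = some (1 : Int) from by decide,
        Option.some.injEq] at h
      omega
    · simp only [show PySem.Chars.pyGet? "Q2".toList 1 = some '2' from by decide,
        show PySem.Int.ofStr? (String.ofList ['2']) = some (2 : Int) from by decide,
        Option.some.injEq] at h
      omega
    · simp only [show PySem.Chars.pyGet? "Q3".toList 1 = some '3' from by decide,
        show PySem.Int.ofStr? (String.ofList ['3']) = some (3 : Int) from by decide,
        Option.some.injEq] at h
      omega
    · simp only [show PySem.Chars.pyGet? "Q4".toList 1 = some '4' from by decide,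
        show PySem.Int.ofStr? (String.ofList ['4']) = some (4 : Int) from by decide,
        Option.some.injEq] at h
      omega
  · rw [if_neg hg] at h; exact absurd h (by simp)

-- the closed-form cell of B, named for the proofs
def pvCell (base i : Int) : Int × Int :=
  (PySem.Int.floordiv (base - i) 4, PySem.Int.mod (base - i) 4 + 1)

lemma pvCell_eq (y q : Int) (h1 : 1 ≤ q) (h4 : q ≤ 4) :
    pvCell (y * 4 + (q - 1)) 1 = if q = 1 then (y - 1, 4) else (y, q - 1) := by
  unfold pvCell
  rw [PySem.Int.floordiv_eq_ediv_of_pos (by norm_num),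
      PySem.Int.mod_eq_emod_of_pos (by norm_num)]
  split_ifs with hq
  · subst hq; simp only [Prod.mk.injEq]; constructor <;> omega
  · simp only [Prod.mk.injEq]; constructor <;> omega

lemma pvCell_congr (b i b' i' : Int) (h : b - i = b' - i') : pvCell b i = pvCell b' i' := by
  unfold pvCell; rw [h]

lemma pvLoop_eq (l : List Int) : ∀ (y q : Int) (acc : List (Int × Int)), 1 ≤ q → q ≤ 4 →
    (l.foldl pvStep (y, q, acc)).2.2
      = acc ++ (List.range l.length).map (fun k : Nat => pvCell (y * 4 + (q - 1)) ((k : Int) + 1)) := by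
  induction l with
  | nil => intro y q acc h1 h4; simp
  | cons x t ih =>
    intro y q acc h1 h4
    have hcell := pvCell_eq y q h1 h4
    by_cases hq : q = 1
    · subst hq
      have hs : pvStep (y, 1, acc) x = (y - 1, 4, acc ++ [(y - 1, 4)]) := by
        simp [pvStep]
      rw [List.foldl_cons, hs, ih (y - 1) 4 _ (by norm_num) (by norm_num)]
      simp only [List.length_cons, List.range_succ_eq_map, List.map_cons, List.map_map]
      rw [List.append_assoc, List.singleton_append]
      apply congrArg
      simp only [List.cons.injEq]
      refine ⟨by simpa using hcell.symm, ?_⟩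
      apply List.map_congr_left; intro k _
      simp only [Function.comp_apply]
      apply pvCell_congr; push_cast; ring
    · have hs : pvStep (y, q, acc) x = (y, q - 1, acc ++ [(y, q - 1)]) := by
        simp [pvStep, hq]
      rw [List.foldl_cons, hs, ih y (q - 1) _ (by omega) (by omega)]
      simp only [List.length_cons, List.range_succ_eq_map, List.map_cons, List.map_map]
      rw [List.append_assoc, List.singleton_append]
      apply congrArg
      simp only [List.cons.injEq]
      refine ⟨by simpa [hq] using hcell.symm, ?_⟩
      apply List.map_congr_left; intro k _
      simp only [Function.comp_apply]
      apply pvCell_congr; push_cast; ring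

-- ===== VERDICT (by name: the statement is the Claim_ definition above) =====
set_option maxHeartbeats 400000 in
theorem build_missing_fiscal_quarters_py_spec : Claim_equal_build_missing_fiscal_quarters_py := by
  intro y p c _
  unfold Spec_build_missing_fiscal_quarters_py
  unfold build_missing_fiscal_quarters_py build_missing_fiscal_quarters_py_alt
  cases PySem.Int.ofStr? (PySem.Int.toStr y) with
  | none => rfl
  | some year =>
    cases hpq : pvPeriodToQuarter p with
    | none => rfl
    | some q =>
      obtain ⟨h1, h4⟩ := pvPeriodToQuarter_bounds p q hpq
      dsimp only
      rw [pvLoop_eq (PySem.List.pyRange 0 c 1) year q [] h1 h4]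
      have hlen : (PySem.List.pyRange 0 c 1).length = c.toNat := by
        rw [PySem.List.length_pyRange_one]; omega
      have hlen2 : ((c + 1 : Int) - 1).toNat = c.toNat := by omega
      rw [hlen, PySem.List.pyRange_one 1 (c + 1), hlen2, List.nil_append, List.map_map]
      apply List.map_congr_left; intro k _
      exact pvCell_congr _ _ _ _ (by ring)
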